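-- pv_equiv track=rewrite | github.com/ilya2U/3-course | Второй семестр/Теория автоматов/TeorAvt2_7.py | class2
-- ===== SOURCE A (Python) =====
-- def class2(Rules,NonTerminals):
--     k = 0
--     for left in Rules.keys():
--         for right in Rules[left]:
--             k += 1
--     KS = False
--     counter = 0
--     for left in Rules.keys():
--         if (len(left) == 1 and left in NonTerminals):
--             for right in Rules[left]:
--                 if len(right) > 0:
--                     counter += 1
--     if counter == k:
--         KS = True
--     else:
--         KS = False
--     return KS
-- ===== SOURCE B (Python) =====
-- def class2(Rules, NonTerminals):
--     # Single short-circuiting pass: every individual rule must have a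
--     # one-symbol non-terminal left side and a non-empty right side.
--     for left, rights in Rules.items():
--         for right in rights:
--             if not (len(left) == 1 and left in NonTerminals and len(right) > 0):
--                 return False
--     return True
-- ===== Notes on version B (the rewrite author's own statement) =====
-- stated objective: simpler
-- what changed: Replaces A's two counting passes (total rule count vs qualifying rule count, then an equality test) by one short-circuiting loop over the items that returns False at the first rule violating the context-free condition; no counters are kept.
import Mathlib
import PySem

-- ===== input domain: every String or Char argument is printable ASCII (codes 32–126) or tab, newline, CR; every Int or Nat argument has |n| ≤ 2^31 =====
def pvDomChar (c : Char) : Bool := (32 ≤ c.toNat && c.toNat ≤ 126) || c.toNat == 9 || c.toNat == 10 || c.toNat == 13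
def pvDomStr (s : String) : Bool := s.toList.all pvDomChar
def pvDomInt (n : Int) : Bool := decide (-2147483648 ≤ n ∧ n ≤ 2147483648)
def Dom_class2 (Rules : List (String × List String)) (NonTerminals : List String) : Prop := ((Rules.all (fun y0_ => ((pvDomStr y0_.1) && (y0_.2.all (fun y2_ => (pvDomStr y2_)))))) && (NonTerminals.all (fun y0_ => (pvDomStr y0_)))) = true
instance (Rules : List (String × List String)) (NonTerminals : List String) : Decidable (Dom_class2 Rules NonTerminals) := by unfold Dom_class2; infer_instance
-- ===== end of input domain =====

-- B replaces A's two counting passes and count-equality test by one short-circuiting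
-- per-rule predicate check (objective: simpler).


-- ===== PORT A =====
def class2 (Rules : List (String × List String)) (NonTerminals : List String) : Bool :=
  let d := PySem.Dict.ofList Rules
  -- k = 0; for left in Rules.keys(): for right in Rules[left]: k += 1
  let k : Int := d.keys.foldl (fun k left =>
      (d.getD left []).foldl (fun k (_ : String) => k + 1) k) 0
  -- counter loop
  let counter : Int := d.keys.foldl (fun c left =>
      if PySem.Str.len left == 1 && NonTerminals.contains left then
        (d.getD left []).foldl (fun c right =>
          if PySem.Str.len right > 0 then c + 1 else c) c
      else c) 0
  -- KS = (counter == k)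
  counter == k

-- ===== PORT B =====
def class2AltGo (nt : List String) : List (String × List String) → Bool
  | [] => true
  | (left, rights) :: rest =>
    if rights.any (fun right =>
        !(PySem.Str.len left == 1 && nt.contains left && decide (0 < PySem.Str.len right))) then
      false
    else class2AltGo nt rest

def class2_alt (Rules : List (String × List String)) (NonTerminals : List String) : Bool :=
  class2AltGo NonTerminals (PySem.Dict.ofList Rules).items

-- ===== PRECONDITION & SPEC =====
def Spec_class2 (Rules : List (String × List String)) (NonTerminals : List String) (out : Bool) : Prop := out = class2_alt Rules NonTerminals
instance (Rules : List (String × List String)) (NonTerminals : List String) (out : Bool) : Decidable (Spec_class2 Rules NonTerminals out) := by unfold Spec_class2; infer_instance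

-- ===== CLAIM (what is proved, stated in full; the proofs are below) =====
def Claim_equal_class2 : Prop := ∀ (Rules : List (String × List String)) (NonTerminals : List String), Dom_class2 Rules NonTerminals → Spec_class2 Rules NonTerminals (class2 Rules NonTerminals)

-- ===== LEMMAS AND PROOFS =====

-- inner k-loop adds the number of rights
theorem innerK (rs : List String) (k : Int) :
    rs.foldl (fun k (_ : String) => k + 1) k = k + rs.length := by
  induction rs generalizing k with
  | nil => simp
  | cons r rs ih =>
    rw [List.foldl_cons, ih]
    simp only [List.length_cons]
    push_cast; omega

-- inner counter loop adds the number of non-empty rights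
theorem innerC (rs : List String) (c : Int) :
    rs.foldl (fun c right => if PySem.Str.len right > 0 then c + 1 else c) c
      = c + ((rs.filter (fun right => decide (0 < PySem.Str.len right))).length : Int) := by
  induction rs generalizing c with
  | nil => simp
  | cons r rs ih =>
    rw [List.foldl_cons, List.filter_cons]
    by_cases h : 0 < PySem.Str.len r
    · rw [if_pos h, decide_eq_true h, ih]
      simp only [if_true, List.length_cons]
      push_cast; omega
    · rw [if_neg h, decide_eq_false h, ih]
      simp only [Bool.false_eq_true, if_false]

def pvKappa (p : String × List String) : Int := (p.2.length : Int)
def pvDelta (nt : List String) (p : String × List String) : Int :=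
  if PySem.Str.len p.1 == 1 && nt.contains p.1 then
    ((p.2.filter (fun right => decide (0 < PySem.Str.len right))).length : Int)
  else 0

theorem kFold_eq (L : List (String × List String)) (k : Int) :
    L.foldl (fun k p => p.2.foldl (fun k (_ : String) => k + 1) k) k
      = k + (L.map pvKappa).sum := by
  induction L generalizing k with
  | nil => simp
  | cons p L ih =>
    rw [List.foldl_cons, innerK, ih]
    simp only [List.map_cons, List.sum_cons, pvKappa]
    omega

theorem cFold_eq (nt : List String) (L : List (String × List String)) (c : Int) :
    L.foldl (fun c p =>
        if PySem.Str.len p.1 == 1 && nt.contains p.1 then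
          p.2.foldl (fun c right => if PySem.Str.len right > 0 then c + 1 else c) c
        else c) c
      = c + (L.map (pvDelta nt)).sum := by
  induction L generalizing c with
  | nil => simp
  | cons p L ih =>
    rw [List.foldl_cons]
    simp only [List.map_cons, List.sum_cons, pvDelta]
    by_cases h : (PySem.Str.len p.1 == 1 && nt.contains p.1) = true
    · rw [if_pos h, if_pos h, innerC, ih]; omega
    · rw [if_neg h, if_neg h, ih]; omega

theorem delta_le_kappa (nt : List String) (p : String × List String) :
    pvDelta nt p ≤ pvKappa p := by
  unfold pvDelta pvKappa
  split
  · exact_mod_cast List.length_filter_le _ _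
  · positivity

theorem delta_eq_kappa_iff (nt : List String) (p : String × List String) :
    pvDelta nt p = pvKappa p ↔
      ∀ r ∈ p.2, (PySem.Str.len p.1 == 1 && nt.contains p.1
                   && decide (0 < PySem.Str.len r)) = true := by
  unfold pvDelta pvKappa
  by_cases h : (PySem.Str.len p.1 == 1 && nt.contains p.1) = true
  · rw [if_pos h, Int.natCast_inj, List.length_filter_eq_length_iff]
    constructor
    · intro hall r hr
      rw [Bool.and_eq_true]; exact ⟨h, hall r hr⟩
    · intro hall r hr
      have := hall r hr; rw [Bool.and_eq_true] at this
      exact this.2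
  · rw [if_neg h]
    constructor
    · intro h0 r hr
      exfalso
      have hlen : p.2.length = 0 := by exact_mod_cast h0.symm
      rw [List.length_eq_zero_iff] at hlen
      rw [hlen] at hr
      simp at hr
    · intro hall
      cases hp2 : p.2 with
      | nil => simp
      | cons r rs =>
        exfalso
        have hx := hall r (by simp [hp2])
        rw [Bool.and_eq_true] at hx
        exact h hx.1

theorem go_eq_true_iff (nt : List String) (L : List (String × List String)) :
    class2AltGo nt L = true ↔
      ∀ p ∈ L, ∀ r ∈ p.2, (PySem.Str.len p.1 == 1 && nt.contains p.1
                   && decide (0 < PySem.Str.len r)) = true := by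
  induction L with
  | nil => simp [class2AltGo]
  | cons p L ih =>
    obtain ⟨left, rights⟩ := p
    simp only [class2AltGo]
    by_cases h : rights.any (fun right =>
        !(PySem.Str.len left == 1 && nt.contains left && decide (0 < PySem.Str.len right))) = true
    · rw [if_pos h]
      constructor
      · intro hfalse; exact absurd hfalse (by simp)
      · intro hall
        exfalso
        obtain ⟨r, hr, hbad⟩ := List.any_eq_true.mp h
        have hx : (PySem.Str.len left == 1 && nt.contains left && decide (0 < PySem.Str.len r)) = true :=
          hall (left, rights) (by simp) r hr
        rw [hx] at hbad
        simp at hbad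
    · rw [if_neg h, ih]
      have hok : ∀ r ∈ rights, (PySem.Str.len left == 1 && nt.contains left && decide (0 < PySem.Str.len r)) = true := by
        intro r hr
        by_contra hb
        refine h (List.any_eq_true.mpr ⟨r, hr, ?_⟩)
        rw [Bool.not_eq_true']
        exact Bool.eq_false_iff.mpr hb
      constructor
      · intro hL p hp r hr
        rcases List.mem_cons.mp hp with hp | hp
        · subst hp; exact hok r hr
        · exact hL p hp r hr
      · intro hall p hp r hr
        exact hall p (List.mem_cons_of_mem _ hp) r hr

theorem sum_eq_iff (nt : List String) (L : List (String × List String)) :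
    ((L.map (pvDelta nt)).sum = (L.map pvKappa).sum) ↔ class2AltGo nt L = true := by
  rw [go_eq_true_iff]
  induction L with
  | nil => simp
  | cons p L ih =>
    simp only [List.map, List.sum_cons]
    have h1 := delta_le_kappa nt p
    have h2 : (L.map (pvDelta nt)).sum ≤ (L.map pvKappa).sum :=
      List.sum_le_sum (fun x _ => delta_le_kappa nt x)
    constructor
    · intro heq
      have hdk : pvDelta nt p = pvKappa p := by omega
      have hs : (L.map (pvDelta nt)).sum = (L.map pvKappa).sum := by omega
      intro q hq r hr
      rcases List.mem_cons.mp hq with hq | hq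
      · subst hq; exact (delta_eq_kappa_iff nt q).mp hdk r hr
      · exact (ih.mp hs) q hq r hr
    · intro hall
      have hdk : pvDelta nt p = pvKappa p :=
        (delta_eq_kappa_iff nt p).mpr (fun r hr => hall p (by simp) r hr)
      have hs : (L.map (pvDelta nt)).sum = (L.map pvKappa).sum :=
        ih.mpr (fun q hq r hr => hall q (List.mem_cons_of_mem _ hq) r hr)
      omega

-- ===== VERDICT (by name: the statement is the Claim_ definition above) =====
theorem class2_spec : Claim_equal_class2 := by
  intro Rules NonTerminals _
  unfold Spec_class2 class2 class2_alt
  set d := PySem.Dict.ofList Rules with hd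
  have hnd : d.keys.Nodup := PySem.Dict.nodup_keys_ofList Rules
  have hitems : d.items = d.keys.map (fun k => (k, d.getD k [])) :=
    PySem.Dict.items_eq_map_keys d hnd []
  have e1 : d.items.foldl (fun k p => p.2.foldl (fun k (_ : String) => k + 1) k) (0:Int)
      = d.keys.foldl (fun k left => (d.getD left []).foldl (fun k (_ : String) => k + 1) k) 0 := by
    rw [hitems, List.foldl_map]
  have e2 : d.items.foldl (fun c p =>
        if PySem.Str.len p.1 == 1 && NonTerminals.contains p.1 then
          p.2.foldl (fun c right => if PySem.Str.len right > 0 then c + 1 else c) c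
        else c) (0:Int)
      = d.keys.foldl (fun c left =>
        if PySem.Str.len left == 1 && NonTerminals.contains left then
          (d.getD left []).foldl (fun c right => if PySem.Str.len right > 0 then c + 1 else c) c
        else c) 0 := by
    rw [hitems, List.foldl_map]
  have e1' : d.keys.foldl (fun k left => (d.getD left []).foldl (fun k (_ : String) => k + 1) k) 0
      = 0 + (d.items.map pvKappa).sum := by
    rw [← e1]; exact kFold_eq d.items 0
  have e2' : d.keys.foldl (fun c left =>
        if PySem.Str.len left == 1 && NonTerminals.contains left then
          (d.getD left []).foldl (fun c right => if PySem.Str.len right > 0 then c + 1 else c) c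
        else c) 0
      = 0 + (d.items.map (pvDelta NonTerminals)).sum := by
    rw [← e2]; exact cFold_eq NonTerminals d.items 0
  have main : ((d.keys.foldl (fun c left =>
        if PySem.Str.len left == 1 && NonTerminals.contains left then
          (d.getD left []).foldl (fun c right => if PySem.Str.len right > 0 then c + 1 else c) c
        else c) (0:Int))
      == (d.keys.foldl (fun k left => (d.getD left []).foldl (fun k (_ : String) => k + 1) k) (0:Int)))
      = class2AltGo NonTerminals d.items := by
    rw [e1', e2']
    simp only [zero_add]
    cases hgo : class2AltGo NonTerminals d.items with
    | true => exact beq_iff_eq.mpr ((sum_eq_iff _ _).mpr hgo)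
    | false =>
      rw [beq_eq_false_iff_ne]
      intro heq
      have h := (sum_eq_iff NonTerminals d.items).mp heq
      rw [hgo] at h
      exact Bool.false_ne_true h
  exact main
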